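-- pv_equiv track=rewrite | github.com/marktennyson/flask-mailing | flask_mailing/security.py | sanitize_email_content
-- ===== SOURCE A (Python) =====
-- def sanitize_email_content(content: str, max_length: int = 1_000_000) -> str:
--     """
--     Sanitize email content to prevent injection attacks.
--
--     Removes or escapes potentially dangerous patterns that could be
--     used for SMTP injection or header manipulation.
--
--     Args:
--         content: Raw email content
--         max_length: Maximum content length (default: 1MB)
--
--     Returns:
--         Sanitized content string
--     """
--     if not isinstance(content, str):
--         content = str(content)
--
--     # Remove potential SMTP injection patterns
--     # These patterns could be used to inject additional headers
--     dangerous_patterns = [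
--         ("\r\n", " "),
--         ("\r", " "),
--         ("\n", " "),
--     ]
--
--     sanitized = content
--     for pattern, replacement in dangerous_patterns:
--         sanitized = sanitized.replace(pattern, replacement)
--
--     # Limit content length to prevent DoS
--     if len(sanitized) > max_length:
--         sanitized = sanitized[:max_length] + "... [content truncated for security]"
--
--     return sanitized.strip()
-- ===== SOURCE B (Python) =====
-- def sanitize_email_content(content: str, max_length: int = 1_000_000) -> str:
--     """Single forward pass over the characters: CRLF, CR and LF each
--     become one space; then the same truncation and strip as before."""
--     if not isinstance(content, str):
--         content = str(content)
--
--     out = []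
--     i, n = 0, len(content)
--     while i < n:
--         c = content[i]
--         if c == "\r":
--             out.append(" ")
--             if i + 1 < n and content[i + 1] == "\n":
--                 i += 1  # CRLF collapses to a single space
--         elif c == "\n":
--             out.append(" ")
--         else:
--             out.append(c)
--         i += 1
--     sanitized = "".join(out)
--
--     if len(sanitized) > max_length:
--         sanitized = sanitized[:max_length] + "... [content truncated for security]"
--
--     return sanitized.strip()
-- ===== Notes on version B (the rewrite author's own statement) =====
-- stated objective: alternative
-- what changed: Replaces the three sequential str.replace passes (CRLF, CR, LF) with one single forward pass over the characters that collapses CRLF to one space and maps lone CR/LF to a space, then the same truncation and strip.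
import Mathlib
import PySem

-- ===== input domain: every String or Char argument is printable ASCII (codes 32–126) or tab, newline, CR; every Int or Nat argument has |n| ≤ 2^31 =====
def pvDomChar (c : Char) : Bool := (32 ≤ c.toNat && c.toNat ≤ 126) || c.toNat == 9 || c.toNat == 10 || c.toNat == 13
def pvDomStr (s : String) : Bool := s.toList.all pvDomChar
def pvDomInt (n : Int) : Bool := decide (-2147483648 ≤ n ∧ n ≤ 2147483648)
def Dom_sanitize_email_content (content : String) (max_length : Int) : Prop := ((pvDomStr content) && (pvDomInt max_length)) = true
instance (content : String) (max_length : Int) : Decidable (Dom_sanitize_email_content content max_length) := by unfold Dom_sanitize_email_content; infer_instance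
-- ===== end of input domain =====

-- B replaces A's three sequential str.replace passes with one single forward pass over the
-- characters (alternative decomposition of the same O(n) task; no speed claim).


-- ===== PORT A =====
-- literal port: a fold over the pattern list of three str.replace passes, then truncation, then strip
def sanitize_email_content (content : String) (max_length : Int) : String :=
  let dangerous_patterns : List (String × String) := [("\r\n", " "), ("\r", " "), ("\n", " ")]
  let sanitized := dangerous_patterns.foldl (fun s p => PySem.Str.replace s p.1 p.2) content
  let sanitized :=
    if (PySem.Str.len sanitized : Int) > max_length then
      PySem.Str.slice sanitized none (some max_length) ++ "... [content truncated for security]"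
    else sanitized
  PySem.Str.strip sanitized

-- ===== PORT B =====
-- single forward pass (Source B's while loop): CRLF consumes two characters and emits one space,
-- a lone CR or LF emits a space, anything else is copied
def pvCollapse : List Char → List Char
  | [] => []
  | [c] => [if c = '\r' ∨ c = '\n' then ' ' else c]
  | a :: b :: t =>
    if a = '\r' ∧ b = '\n' then ' ' :: pvCollapse t
    else (if a = '\r' ∨ a = '\n' then ' ' else a) :: pvCollapse (b :: t)
termination_by l => l.length

def sanitize_email_content_alt (content : String) (max_length : Int) : String :=
  let sanitized := String.ofList (pvCollapse content.toList)
  let sanitized :=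
    if (PySem.Str.len sanitized : Int) > max_length then
      PySem.Str.slice sanitized none (some max_length) ++ "... [content truncated for security]"
    else sanitized
  PySem.Str.strip sanitized

-- ===== PRECONDITION & SPEC =====
def Spec_sanitize_email_content (content : String) (max_length : Int) (out : String) : Prop := out = sanitize_email_content_alt content max_length
instance (content : String) (max_length : Int) (out : String) : Decidable (Spec_sanitize_email_content content max_length out) := by unfold Spec_sanitize_email_content; infer_instance

-- ===== CLAIM (what is proved, stated in full; the proofs are below) =====
def Claim_equal_sanitize_email_content : Prop := ∀ (content : String) (max_length : Int), Dom_sanitize_email_content content max_length → Spec_sanitize_email_content content max_length (sanitize_email_content content max_length)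

-- ===== LEMMAS AND PROOFS =====

lemma go_nil (old new : List Char) (fuel : Nat) (acc : List Char) :
    PySem.Chars.replace.go old new fuel [] acc = acc.reverse := by
  cases fuel with
  | zero => rw [PySem.Chars.replace.go.eq_def]; simp
  | succ n => rw [PySem.Chars.replace.go.eq_def]


lemma go_cons (old new : List Char) (fuel : Nat) (c : Char) (t acc : List Char) :
    PySem.Chars.replace.go old new (fuel+1) (c :: t) acc
      = (if old.isPrefixOf (c :: t) = true then
          PySem.Chars.replace.go old new fuel (List.drop old.length (c :: t)) (new.reverse ++ acc)
        else PySem.Chars.replace.go old new fuel t (c :: acc)) := by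
  rw [PySem.Chars.replace.go.eq_def]

-- replacement of a SINGLE character is a map
lemma go_single (a b : Char) (l : List Char) : ∀ (acc : List Char) (fuel : Nat), l.length ≤ fuel →
    PySem.Chars.replace.go [a] [b] fuel l acc
      = acc.reverse ++ l.map (fun c => if c = a then b else c) := by
  induction l with
  | nil => intro acc fuel _; simp [go_nil]
  | cons c t ih =>
    intro acc fuel h
    cases fuel with
    | zero => simp at h
    | succ fuel =>
      rw [go_cons]
      have hf : t.length ≤ fuel := by simp only [List.length_cons] at h; omega
      by_cases hc : c = a
      · have hpre : List.isPrefixOf [a] (c :: t) = true := by simp [List.isPrefixOf, hc]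
        rw [hpre, if_pos rfl,
            show List.drop ([a] : List Char).length (c :: t) = t from rfl,
            ih ([b].reverse ++ acc) fuel hf]
        simp [hc]
      · have hpre : List.isPrefixOf [a] (c :: t) = false := by
          simp [List.isPrefixOf, Ne.symm hc]
        rw [hpre, if_neg (by simp), ih (c :: acc) fuel hf]
        simp [hc]

lemma replace_single (a b : Char) (l : List Char) :
    PySem.Chars.replace l [a] [b] = l.map (fun c => if c = a then b else c) := by
  rw [PySem.Chars.replace]
  rw [if_neg (by simp)]
  simpa using go_single a b l [] l.length le_rfl

-- characterisation of replace with the two-character pattern "\r\n"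
def pvRepCRLF : List Char → List Char
  | [] => []
  | [c] => [c]
  | a :: b :: t => if a = '\r' ∧ b = '\n' then ' ' :: pvRepCRLF t else a :: pvRepCRLF (b :: t)
termination_by l => l.length

lemma go_crlf (l : List Char) : ∀ (acc : List Char) (fuel : Nat), l.length ≤ fuel →
    PySem.Chars.replace.go ['\r', '\n'] [' '] fuel l acc = acc.reverse ++ pvRepCRLF l := by
  induction l using pvRepCRLF.induct with
  | case1 => intro acc fuel _; simp [go_nil, pvRepCRLF]
  | case2 c =>
    intro acc fuel h
    cases fuel with
    | zero => simp at h
    | succ fuel =>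
      rw [go_cons]
      have hpre : List.isPrefixOf ['\r', '\n'] [c] = false := by
        simp [List.isPrefixOf]
      rw [hpre, if_neg (by simp), go_nil]
      simp [pvRepCRLF]
  | case3 a b t hab ih =>
    intro acc fuel h
    cases fuel with
    | zero => simp at h
    | succ fuel =>
      rw [go_cons]
      have hpre : List.isPrefixOf ['\r', '\n'] (a :: b :: t) = true := by
        simp [List.isPrefixOf, hab.1, hab.2]
      rw [hpre, if_pos rfl]
      rw [show List.drop (['\r', '\n'] : List Char).length (a :: b :: t) = t from rfl]
      rw [ih ([' '].reverse ++ acc) fuel (by simp only [List.length_cons] at h; omega)]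
      simp [pvRepCRLF, hab]
  | case4 a b t hab ih =>
    intro acc fuel h
    cases fuel with
    | zero => simp at h
    | succ fuel =>
      rw [go_cons]
      have hpre : List.isPrefixOf ['\r', '\n'] (a :: b :: t) = false := by
        by_cases ha : a = '\r'
        · have hbne : ¬ b = '\n' := fun h2 => hab ⟨ha, h2⟩
          simp [List.isPrefixOf, Ne.symm hbne]
        · simp [List.isPrefixOf, Ne.symm ha]
      rw [hpre, if_neg (by simp)]
      rw [ih (a :: acc) fuel (by simp only [List.length_cons] at h ⊢; omega)]
      simp [pvRepCRLF, hab]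

lemma replace_crlf (l : List Char) :
    PySem.Chars.replace l ['\r', '\n'] [' '] = pvRepCRLF l := by
  rw [PySem.Chars.replace]
  rw [if_neg (by simp)]
  simpa using go_crlf l [] l.length le_rfl

-- the single pass equals the three-pass chain on the character level
lemma collapse_eq_maps (l : List Char) :
    pvCollapse l
      = ((pvRepCRLF l).map (fun c => if c = '\r' then ' ' else c)).map
          (fun c => if c = '\n' then ' ' else c) := by
  induction l using pvCollapse.induct with
  | case1 => simp [pvCollapse, pvRepCRLF]
  | case2 c =>
    by_cases h1 : c = '\r' <;> by_cases h2 : c = '\n' <;>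
      simp [pvCollapse, pvRepCRLF, h1, h2]
  | case3 a b t hab ih =>
    simp [pvCollapse, pvRepCRLF, hab, ih]
  | case4 a b t hab ih =>
    by_cases h1 : a = '\r'
    · have hb : ¬ b = '\n' := fun h2 => hab ⟨h1, h2⟩
      simp [pvCollapse, pvRepCRLF, h1, hb, ih]
    · by_cases h2 : a = '\n' <;>
        simp [pvCollapse, pvRepCRLF, h1, h2, ih]

lemma chain_eq_collapse (s : String) :
    PySem.Str.replace (PySem.Str.replace (PySem.Str.replace s "\r\n" " ") "\r" " ") "\n" " "
      = String.ofList (pvCollapse s.toList) := by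
  apply String.toList_inj.mp
  simp only [PySem.Str.toList_replace, String.toList_ofList]
  rw [show ("\r\n" : String).toList = ['\r', '\n'] from rfl,
      show ("\r" : String).toList = ['\r'] from rfl,
      show ("\n" : String).toList = ['\n'] from rfl,
      show (" " : String).toList = [' '] from rfl]
  rw [replace_crlf, replace_single, replace_single, collapse_eq_maps]

-- ===== VERDICT (by name: the statement is the Claim_ definition above) =====
theorem sanitize_email_content_spec : Claim_equal_sanitize_email_content := by
  intro content max_length _
  unfold Spec_sanitize_email_content sanitize_email_content sanitize_email_content_alt
  simp only [List.foldl]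
  rw [chain_eq_collapse]
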